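-- pv_equiv track=rewrite | github.com/kanatakayasu/apriori-window | paper/G-sequential-dense/implementation/python/sequential_dense.py | generate_sequential_candidates
-- ===== SOURCE A (Python) =====
-- from typing import Dict, List, Optional, Sequence, Tuple
--
-- def generate_sequential_candidates(
--     prev_frequents: List[Tuple[int, ...]],
--     k: int,
-- ) -> List[Tuple[int, ...]]:
--     """
--     長さ k-1 の頻出系列から長さ k の候補系列を生成する。
--
--     接頭辞・接尾辞結合: seq1[1:] == seq2[:-1] のとき、
--     seq1 + (seq2[-1],) を候補とする。
--     """
--     candidates_set: set = set()
--     suffix_map: Dict[Tuple[int, ...], List[Tuple[int, ...]]] = {}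
--
--     for seq in prev_frequents:
--         prefix = seq[:-1]
--         suffix_map.setdefault(prefix, []).append(seq)
--
--     for seq in prev_frequents:
--         suffix_key = seq[1:]  # この系列の接尾辞
--         if suffix_key in suffix_map:
--             for extendable in suffix_map[suffix_key]:
--                 new_seq = seq + (extendable[-1],)
--                 candidates_set.add(new_seq)
--
--     return sorted(candidates_set)
-- ===== SOURCE B (Python) =====
-- def generate_sequential_candidates(prev_frequents, k):
--     candidates_set = set()
--     for seq1 in prev_frequents:
--         for seq2 in prev_frequents:
--             if seq1[1:] == seq2[:-1]:
--                 candidates_set.add(seq1 + (seq2[-1],))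
--     return sorted(candidates_set)
-- ===== Notes on version B (the rewrite author's own statement) =====
-- stated objective: simpler
-- what changed: Replaces the two-phase build-a-prefix-hash-map-then-look-up join by a single naive all-pairs nested loop testing seq1[1:] == seq2[:-1] directly.
import Mathlib
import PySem

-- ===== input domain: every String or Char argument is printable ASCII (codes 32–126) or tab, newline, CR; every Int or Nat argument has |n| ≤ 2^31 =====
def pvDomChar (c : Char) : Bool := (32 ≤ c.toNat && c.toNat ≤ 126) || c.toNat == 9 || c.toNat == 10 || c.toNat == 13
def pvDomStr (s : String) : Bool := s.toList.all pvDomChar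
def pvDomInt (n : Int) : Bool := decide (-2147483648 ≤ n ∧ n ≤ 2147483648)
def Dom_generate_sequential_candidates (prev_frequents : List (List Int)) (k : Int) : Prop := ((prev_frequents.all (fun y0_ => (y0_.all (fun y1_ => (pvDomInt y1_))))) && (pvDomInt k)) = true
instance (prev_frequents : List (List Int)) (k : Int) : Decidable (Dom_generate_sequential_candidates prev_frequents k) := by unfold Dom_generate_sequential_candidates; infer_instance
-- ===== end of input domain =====

-- B replaces A's build-a-prefix-map-then-look-up join by one naive all-pairs nested loop (simpler, not faster).

-- ===== PORT A =====
def generate_sequential_candidates (prev_frequents : List (List Int)) (k : Int) : List (List Int) :=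
  let suffix_map : PySem.Dict (List Int) (List (List Int)) :=
    prev_frequents.foldl
      (fun d seq => d.modify (PySem.List.slice seq none (some (-1))) [] (fun l => l ++ [seq]))
      PySem.Dict.empty
  let candidates_set : PySem.Set (List Int) :=
    prev_frequents.foldl
      (fun s seq =>
        match suffix_map.get? (PySem.List.slice seq (some 1) none) with
        | none => s
        | some exts =>
            exts.foldl (fun s e => PySem.Set.add s (seq ++ [PySem.List.pyGetD e (-1) 0])) s)
      PySem.Set.empty
  PySem.List.sorted candidates_set (fun x => x) false

-- ===== PORT B =====
def generate_sequential_candidates_alt (prev_frequents : List (List Int)) (k : Int) : List (List Int) :=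
  let candidates_set : PySem.Set (List Int) :=
    prev_frequents.foldl
      (fun s seq1 =>
        prev_frequents.foldl
          (fun s seq2 =>
            if PySem.List.slice seq1 (some 1) none == PySem.List.slice seq2 none (some (-1))
            then PySem.Set.add s (seq1 ++ [PySem.List.pyGetD seq2 (-1) 0])
            else s)
          s)
      PySem.Set.empty
  PySem.List.sorted candidates_set (fun x => x) false

-- ===== PRECONDITION & SPEC =====
-- Pre_ excludes inputs containing the empty sequence, on which BOTH A and B raise IndexError
-- (extendable[-1] / seq2[-1] on an empty tuple).
def Pre_generate_sequential_candidates (prev_frequents : List (List Int)) (k : Int) : Prop :=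
  [] ∉ prev_frequents

instance (prev_frequents : List (List Int)) (k : Int) : Decidable (Pre_generate_sequential_candidates prev_frequents k) := by unfold Pre_generate_sequential_candidates; infer_instance

def pvWitness_generate_sequential_candidates : List (List Int) × Int := ([[1, 2], [2, 3], [2, 4]], 3)

def Spec_generate_sequential_candidates (prev_frequents : List (List Int)) (k : Int) (out : List (List Int)) : Prop := out = generate_sequential_candidates_alt prev_frequents k
instance (prev_frequents : List (List Int)) (k : Int) (out : List (List Int)) : Decidable (Spec_generate_sequential_candidates prev_frequents k out) := by unfold Spec_generate_sequential_candidates; infer_instance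

-- ===== CLAIM (what is proved, stated in full; the proofs are below) =====
def Claim_equal_generate_sequential_candidates : Prop := ∀ (prev_frequents : List (List Int)) (k : Int), Dom_generate_sequential_candidates prev_frequents k → Pre_generate_sequential_candidates prev_frequents k → Spec_generate_sequential_candidates prev_frequents k (generate_sequential_candidates prev_frequents k)

-- ===== LEMMAS AND PROOFS =====

-- A's suffix_map, looked up with default [], returns exactly the sequences whose prefix is the key.
lemma suffix_map_getD (prev : List (List Int)) (key : List Int) :
    (prev.foldl
      (fun d seq => d.modify (PySem.List.slice seq none (some (-1))) [] (fun l => l ++ [seq]))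
      PySem.Dict.empty).getD key []
    = prev.filter (fun e => PySem.List.slice e none (some (-1)) == key) := by
  have h := PySem.Dict.getD_foldl_modify_append
    (l := prev.map (fun s => (PySem.List.slice s none (some (-1)), s)))
    (d := (PySem.Dict.empty : PySem.Dict (List Int) (List (List Int)))) (c := key)
  rw [List.foldl_map] at h
  simpa [List.filter_map, List.map_map, Function.comp_def] using h

-- ===== VERDICT (by name: the statement is the Claim_ definition above) =====
theorem generate_sequential_candidates_spec : Claim_equal_generate_sequential_candidates := by
  intro prev k _ _
  unfold Spec_generate_sequential_candidates
  unfold generate_sequential_candidates generate_sequential_candidates_alt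
  dsimp only
  congr 1
  apply List.foldl_ext
  intro s seq1 _
  have hsym : ∀ seq2 : List Int,
      (PySem.List.slice seq1 (some 1) none == PySem.List.slice seq2 none (some (-1)))
      = (PySem.List.slice seq2 none (some (-1)) == PySem.List.slice seq1 (some 1) none) := by
    intro seq2; simp [eq_comm]
  simp only [hsym]
  rw [← List.foldl_filter]
  have hgd := suffix_map_getD prev (PySem.List.slice seq1 (some 1) none)
  rw [PySem.Dict.getD_eq_get?_getD] at hgd
  cases hget : (prev.foldl
      (fun d seq => d.modify (PySem.List.slice seq none (some (-1))) [] (fun l => l ++ [seq]))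
      PySem.Dict.empty).get? (PySem.List.slice seq1 (some 1) none) with
  | none =>
      rw [hget] at hgd
      simp only [Option.getD_none] at hgd
      simp [← hgd]
  | some exts =>
      rw [hget] at hgd
      simp only [Option.getD_some] at hgd
      simp [hgd]
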